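-- pv_equiv track=rewrite | github.com/PonnagantiHemanth/testing_tool | py-test-box/PYTESTBOX/LIBS/PYSETUP/PYTHON/pysetup/__init__.py | _extractEggInfo
-- ===== SOURCE A (Python) =====
-- def _extractEggInfo(eggInfo):
--     '''
--     Extracts relevant information from an PKG-INFO file
--
--     @param  eggInfo [in] (str) The contents of a PKG-INFO file
--     @return tuple(requires, name, version)
--     '''
--
--     # Extract relevant information from the contents
--     eggName = None
--     eggVersion = None
--     eggRequires = []
--     for line in [x.rstrip() for x in eggInfo.split('\n')]:
--         if not line.startswith(' '):
--             if (line.startswith('Name:')):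
--                 eggName = line[len('Name:'):].strip()
--             elif (line.startswith('Version:')):
--                 eggVersion = line[len('Version:'):].strip()
--             elif (line.startswith('Requires:')):
--                 eggRequires.append(line[len('Requires:'):].strip())
--             # end if
--         # end if
--     # end for
--
--     return eggRequires, eggName, eggVersion
-- ===== SOURCE B (Python) =====
-- def _extractEggInfo(eggInfo):
--     '''
--     Extracts relevant information from an PKG-INFO file
--
--     @param  eggInfo [in] (str) The contents of a PKG-INFO file
--     @return tuple(requires, name, version)
--     '''
--     fields = [l for l in (x.rstrip() for x in eggInfo.split('\n'))
--               if not l.startswith(' ')]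
--     eggRequires = [l[len('Requires:'):].strip()
--                    for l in fields if l.startswith('Requires:')]
--     eggName = next((l[len('Name:'):].strip()
--                     for l in reversed(fields) if l.startswith('Name:')), None)
--     eggVersion = next((l[len('Version:'):].strip()
--                        for l in reversed(fields) if l.startswith('Version:')), None)
--     return eggRequires, eggName, eggVersion
-- ===== Notes on version B (the rewrite author's own statement) =====
-- stated objective: alternative
-- what changed: A's single stateful loop with nested if/elif branches is replaced by three independent field-specific passes: a filter/comprehension collecting the Requires values, and two last-match scans over the reversed filtered lines for Name and Version (None default).
import Mathlib
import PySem

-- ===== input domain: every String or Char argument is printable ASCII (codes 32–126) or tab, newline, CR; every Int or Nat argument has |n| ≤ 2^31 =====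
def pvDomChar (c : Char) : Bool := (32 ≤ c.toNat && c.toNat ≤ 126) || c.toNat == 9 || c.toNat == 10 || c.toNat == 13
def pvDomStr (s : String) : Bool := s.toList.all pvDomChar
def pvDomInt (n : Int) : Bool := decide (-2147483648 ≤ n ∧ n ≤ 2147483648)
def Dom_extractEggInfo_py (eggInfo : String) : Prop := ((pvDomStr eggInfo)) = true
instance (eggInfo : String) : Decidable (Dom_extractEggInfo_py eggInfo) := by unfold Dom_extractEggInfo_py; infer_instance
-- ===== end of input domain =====

-- B replaces A's single branchy stateful loop by three independent field-specific passes
-- (a filter-map for Requires, last-match scans for Name/Version); objective: alternative decomposition.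


-- ===== PORT A =====
-- line[len(pre):].strip()  (pre is the literal 'Name:' / 'Version:' / 'Requires:')
def eiFieldA (line pre : List Char) : String :=
  String.ofList (PySem.Chars.strip (PySem.List.slice line (some (pre.length : Int)) none))

-- one iteration of A's for-loop body; state = (eggRequires, eggName, eggVersion)
def eiStepA (st : List String × Option String × Option String) (line : List Char) :
    List String × Option String × Option String :=
  if !(PySem.Chars.startswith line [' ']) then
    if PySem.Chars.startswith line "Name:".toList then
      (st.1, some (eiFieldA line "Name:".toList), st.2.2)
    else if PySem.Chars.startswith line "Version:".toList then
      (st.1, st.2.1, some (eiFieldA line "Version:".toList))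
    else if PySem.Chars.startswith line "Requires:".toList then
      (st.1 ++ [eiFieldA line "Requires:".toList], st.2.1, st.2.2)
    else st
  else st

def extractEggInfo_py (eggInfo : String) : List String × Option String × Option String :=
  ((PySem.Chars.splitOn eggInfo.toList ['\n']).map PySem.Chars.rstrip).foldl eiStepA ([], none, none)

-- ===== PORT B =====
-- [l[len('Requires:'):].strip() for l in fields if l.startswith('Requires:')]
def eiReqsB (fields : List (List Char)) : List String :=
  (fields.filter (fun l => PySem.Chars.startswith l "Requires:".toList)).map
    (fun l => String.ofList (PySem.Chars.strip
      (PySem.List.slice l (some (("Requires:".toList).length : Int)) none)))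

-- next((l[len(pre):].strip() for l in reversed(fields) if l.startswith(pre)), None)
def eiLastB (fields : List (List Char)) (pre : List Char) : Option String :=
  (fields.reverse.find? (fun l => PySem.Chars.startswith l pre)).map
    (fun l => String.ofList (PySem.Chars.strip (PySem.List.slice l (some (pre.length : Int)) none)))

def extractEggInfo_py_alt (eggInfo : String) : List String × Option String × Option String :=
  let fields := ((PySem.Chars.splitOn eggInfo.toList ['\n']).map PySem.Chars.rstrip).filter
      (fun l => !(PySem.Chars.startswith l [' ']))
  (eiReqsB fields, eiLastB fields "Name:".toList, eiLastB fields "Version:".toList)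

-- ===== PRECONDITION & SPEC =====
def Spec_extractEggInfo_py (eggInfo : String) (out : List String × Option String × Option String) : Prop := out = extractEggInfo_py_alt eggInfo
instance (eggInfo : String) (out : List String × Option String × Option String) : Decidable (Spec_extractEggInfo_py eggInfo out) := by unfold Spec_extractEggInfo_py; infer_instance

-- ===== CLAIM (what is proved, stated in full; the proofs are below) =====
def Claim_equal_extractEggInfo_py : Prop := ∀ (eggInfo : String), Dom_extractEggInfo_py eggInfo → Spec_extractEggInfo_py eggInfo (extractEggInfo_py eggInfo)

-- ===== LEMMAS AND PROOFS =====

-- no line starts with two of the key prefixes at once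
theorem eiStartsExcl {p q : List Char} (x : List Char) (hpq : ¬ (p <+: q) ∧ ¬ (q <+: p))
    (h : PySem.Chars.startswith x p = true) : PySem.Chars.startswith x q = false := by
  simp only [PySem.Chars.startswith, List.isPrefixOf_iff_prefix, Bool.eq_false_iff, ne_eq] at h ⊢
  intro hv
  rcases List.prefix_or_prefix_of_prefix h hv with hc | hc
  · exact hpq.1 hc
  · exact hpq.2 hc

-- last-match scan, unfolded one line at the front
theorem eiLastB_cons (x : List Char) (F : List (List Char)) (pre : List Char) :
    eiLastB (x :: F) pre =
      (eiLastB F pre).or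
        (if PySem.Chars.startswith x pre then some (eiFieldA x pre) else none) := by
  simp only [eiLastB, eiFieldA, List.reverse_cons, List.find?_append]
  cases h : (List.reverse F).find? (fun l => PySem.Chars.startswith l pre) <;>
    simp [List.find?]; split_ifs <;> simp_all

-- A's fold over any line list, characterised by B's three passes (general accumulator)
theorem eiFold_eq (M : List (List Char)) (r : List String) (n v : Option String) :
    M.foldl eiStepA (r, n, v) =
      (r ++ eiReqsB (M.filter (fun l => !(PySem.Chars.startswith l [' ']))),
       (eiLastB (M.filter (fun l => !(PySem.Chars.startswith l [' ']))) "Name:".toList).or n,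
       (eiLastB (M.filter (fun l => !(PySem.Chars.startswith l [' ']))) "Version:".toList).or v) := by
  induction M generalizing r n v with
  | nil => simp [eiReqsB, eiLastB]
  | cons x M ih =>
    simp only [List.foldl_cons, List.filter_cons]
    by_cases hsp : PySem.Chars.startswith x [' '] = true
    · simp [eiStepA, hsp, ih]
    · rw [Bool.not_eq_true] at hsp
      by_cases hn : PySem.Chars.startswith x ['N','a','m','e',':'] = true
      · have hv := eiStartsExcl x (by decide) hn (q := ['V','e','r','s','i','o','n',':'])
        have hr := eiStartsExcl x (by decide) hn (q := ['R','e','q','u','i','r','e','s',':'])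
        simp [eiStepA, hsp, hn, hv, hr, ih, eiReqsB, eiFieldA, eiLastB_cons]
      · by_cases hv : PySem.Chars.startswith x ['V','e','r','s','i','o','n',':'] = true
        · have hr := eiStartsExcl x (by decide) hv (q := ['R','e','q','u','i','r','e','s',':'])
          simp [eiStepA, hsp, hn, hv, hr, ih, eiReqsB, eiFieldA, eiLastB_cons]
        · by_cases hr : PySem.Chars.startswith x ['R','e','q','u','i','r','e','s',':'] = true
          · simp [eiStepA, hsp, hn, hv, hr, ih, eiReqsB, eiFieldA, eiLastB_cons]
          · simp [eiStepA, hsp, hn, hv, hr, ih, eiReqsB, eiLastB_cons]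

-- ===== VERDICT (by name: the statement is the Claim_ definition above) =====
theorem extractEggInfo_py_spec : Claim_equal_extractEggInfo_py := by
  intro eggInfo _
  show _ = _
  simp [extractEggInfo_py, extractEggInfo_py_alt, eiFold_eq]
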